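-- pv_equiv track=rewrite | github.com/Himanshigupta1624/dsa | array.py | min_mx
-- ===== SOURCE A (Python) =====
-- def min_mx(arr):
--     if not arr:
--         return None,None
--     mn=mx=arr[0]
--     for x in arr:
--         if x<mn:
--             mn=x
--         if x>mx:
--             mx=x
--     return mn,mx
-- ===== SOURCE B (Python) =====
-- def min_mx(arr):
--     if not arr:
--         return None, None
--     s = sorted(arr)
--     return s[0], s[-1]
-- ===== Notes on version B (the rewrite author's own statement) =====
-- stated objective: alternative
-- what changed: Replaced the fused linear scan maintaining two accumulators with sort-then-endpoints: sort the list once and read the minimum at index 0 and the maximum at index -1.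
import Mathlib
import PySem

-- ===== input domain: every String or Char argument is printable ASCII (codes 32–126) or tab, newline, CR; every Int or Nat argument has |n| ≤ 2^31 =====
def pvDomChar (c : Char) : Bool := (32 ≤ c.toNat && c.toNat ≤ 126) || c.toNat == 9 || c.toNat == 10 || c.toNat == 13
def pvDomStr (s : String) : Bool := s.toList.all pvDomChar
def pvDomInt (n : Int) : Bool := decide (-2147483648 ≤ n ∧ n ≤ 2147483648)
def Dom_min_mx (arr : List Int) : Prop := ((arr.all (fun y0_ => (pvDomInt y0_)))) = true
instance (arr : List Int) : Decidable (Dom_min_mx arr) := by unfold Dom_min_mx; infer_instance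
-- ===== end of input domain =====

-- B replaces A's fused min/max scan with sort-then-endpoints (alternative decomposition, O(n log n)).

-- ===== PORT A =====
def min_mx (arr : List Int) : Option Int × Option Int :=
  match arr with
  | [] => (none, none)
  | a :: _ =>
    let p := arr.foldl (fun (p : Int × Int) x =>
      (if x < p.1 then x else p.1, if x > p.2 then x else p.2)) (a, a)
    (some p.1, some p.2)

-- ===== PORT B =====
def min_mx_alt (arr : List Int) : Option Int × Option Int :=
  match arr with
  | [] => (none, none)
  | _ :: _ =>
    let s := PySem.List.sorted arr (fun x => x) false
    (PySem.List.pyGet? s 0, PySem.List.pyGet? s (-1))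

-- ===== PRECONDITION & SPEC =====
def Spec_min_mx (arr : List Int) (out : Option Int × Option Int) : Prop := out = min_mx_alt arr
instance (arr : List Int) (out : Option Int × Option Int) : Decidable (Spec_min_mx arr out) := by unfold Spec_min_mx; infer_instance

-- ===== CLAIM (what is proved, stated in full; the proofs are below) =====
def Claim_equal_min_mx : Prop := ∀ (arr : List Int), Dom_min_mx arr → Spec_min_mx arr (min_mx arr)

-- ===== LEMMAS AND PROOFS =====

-- A's fused pair fold is the pair of the min fold and the max fold.
theorem pair_fold_eq (l : List Int) (a b : Int) :
    l.foldl (fun (p : Int × Int) x =>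
      (if x < p.1 then x else p.1, if x > p.2 then x else p.2)) (a, b)
      = (l.foldl min a, l.foldl max b) := by
  induction l generalizing a b with
  | nil => rfl
  | cons x t ih =>
    simp only [List.foldl]
    rw [ih]
    congr 1
    · congr 1
      rw [min_def]; split_ifs <;> omega
    · congr 1
      rw [max_def]; split_ifs <;> omega

theorem fold_min_mem (l : List Int) (a : Int) : l.foldl min a ∈ a :: l := by
  induction l generalizing a with
  | nil => simp
  | cons x t ih =>
    simp only [List.foldl]
    have h := ih (min a x)
    rcases List.mem_cons.mp h with h | h
    · rw [h]; rcases min_choice a x with hm | hm <;> rw [hm] <;> simp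
    · simp [h]

theorem fold_min_le (l : List Int) (a : Int) :
    l.foldl min a ≤ a ∧ ∀ x ∈ l, l.foldl min a ≤ x := by
  induction l generalizing a with
  | nil => simp
  | cons x t ih =>
    simp only [List.foldl]
    have h := ih (min a x)
    refine ⟨le_trans h.1 (min_le_left _ _), ?_⟩
    intro y hy
    rcases List.mem_cons.mp hy with hy | hy
    · rw [hy]; exact le_trans h.1 (min_le_right _ _)
    · exact h.2 y hy

theorem fold_max_mem (l : List Int) (a : Int) : l.foldl max a ∈ a :: l := by
  induction l generalizing a with
  | nil => simp
  | cons x t ih =>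
    simp only [List.foldl]
    have h := ih (max a x)
    rcases List.mem_cons.mp h with h | h
    · rw [h]; rcases max_choice a x with hm | hm <;> rw [hm] <;> simp
    · simp [h]

theorem fold_max_ge (l : List Int) (a : Int) :
    a ≤ l.foldl max a ∧ ∀ x ∈ l, x ≤ l.foldl max a := by
  induction l generalizing a with
  | nil => simp
  | cons x t ih =>
    simp only [List.foldl]
    have h := ih (max a x)
    refine ⟨le_trans (le_max_left _ _) h.1, ?_⟩
    intro y hy
    rcases List.mem_cons.mp hy with hy | hy
    · rw [hy]; exact le_trans (le_max_right _ _) h.1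
    · exact h.2 y hy

-- the last element of sorted(arr) is ≥ every element of arr
theorem sorted_getLast_ge (arr : List Int) (m : Int)
    (hm : (PySem.List.sorted arr (fun x => x) false).getLast? = some m) :
    ∀ y ∈ arr, y ≤ m := by
  intro y hy
  have hyS : y ∈ PySem.List.sorted arr (fun x => x) false :=
    (PySem.List.mem_sorted _ _ _ _).mpr hy
  obtain ⟨p, hp, hyp⟩ := List.mem_iff_getElem.mp hyS
  have hlast : m = (PySem.List.sorted arr (fun x => x) false)[(PySem.List.sorted arr (fun x => x) false).length - 1]'(by omega) := by
    rw [List.getLast?_eq_getElem?, List.getElem?_eq_getElem (by omega)] at hm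
    exact (Option.some_inj.mp hm).symm
  rw [hlast, ← hyp]
  exact PySem.List.sorted_id_getElem_mono arr (by omega) (by omega)

-- ===== VERDICT (by name: the statement is the Claim_ definition above) =====
theorem min_mx_spec : Claim_equal_min_mx := by
  intro arr _
  unfold Spec_min_mx min_mx min_mx_alt
  match arr with
  | [] => rfl
  | a :: t =>
    simp only [pair_fold_eq, PySem.List.pyGet?_neg_one]
    set s := PySem.List.sorted (a :: t) (fun x => x) false with hs
    have hne : s ≠ [] := by
      rw [hs, Ne, PySem.List.sorted_eq_nil_iff]; simp
    obtain ⟨m, t', hcons⟩ := List.exists_cons_of_ne_nil hne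
    have hconsS : PySem.List.sorted (a :: t) (fun x => x) false = m :: t' :=
      hs.symm.trans hcons
    have hlastne : s.getLast? = some (s.getLast hne) :=
      List.getLast?_eq_some_getLast hne
    -- min side
    have hfminle := fold_min_le (a :: t) a
    have hminmem : (a :: t).foldl min a ∈ (a :: t) := by
      rcases List.mem_cons.mp (fold_min_mem (a :: t) a) with h | h
      · rw [h]; simp
      · exact h
    have hhead : ∀ y ∈ (a :: t), m ≤ y :=
      PySem.List.key_head_sorted_le (a :: t) (fun x => x) hconsS
    have hmmem : m ∈ (a :: t) := by
      have hmS : m ∈ s := by rw [hcons]; simp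
      exact (PySem.List.mem_sorted _ _ _ _).mp hmS
    have hmin_eq : (a :: t).foldl min a = m :=
      le_antisymm (hfminle.2 m hmmem) (hhead _ hminmem)
    -- max side
    have hMmem : s.getLast hne ∈ (a :: t) :=
      (PySem.List.mem_sorted _ _ _ _).mp (List.getLast_mem hne)
    have hfmaxge := fold_max_ge (a :: t) a
    have hmaxmem : (a :: t).foldl max a ∈ (a :: t) := by
      rcases List.mem_cons.mp (fold_max_mem (a :: t) a) with h | h
      · rw [h]; simp
      · exact h
    have hlastge : ∀ y ∈ (a :: t), y ≤ s.getLast hne :=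
      sorted_getLast_ge (a :: t) (s.getLast hne) hlastne
    have hmax_eq : (a :: t).foldl max a = s.getLast hne :=
      le_antisymm (hlastge _ hmaxmem) (hfmaxge.2 _ hMmem)
    rw [hcons]
    simp only [PySem.List.pyGet?_zero_cons]
    rw [← hcons, hlastne, hmin_eq, hmax_eq]
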